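-- pv_equiv track=rewrite | github.com/Niko-shvets/NNLP | Word2vec, doc2vec/classifier_best.py | surround_non_symbols
-- ===== SOURCE A (Python) =====
-- import string
-- import string
--
-- def surround_non_symbols(word):
--     new_word=''
--     list_letters=list(word)
--     for symbol in list_letters:
--         if symbol in set(string.punctuation):
--             symbol=' '+symbol+' '
--         else:
--             symbol=symbol
--         new_word+=symbol
--     return new_word
-- ===== SOURCE B (Python) =====
-- import string
--
-- def surround_non_symbols(word):
--     result = word
--     for c in string.punctuation:
--         result = result.replace(c, ' ' + c + ' ')
--     return result
-- ===== Notes on version B (the rewrite author's own statement) =====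
-- stated objective: faster
-- what changed: Instead of scanning the input character by character and appending to a string accumulator, B iterates over the fixed punctuation alphabet and rewrites the whole string once per punctuation char with str.replace, which runs in C; replacements cannot interfere because the inserted separators are not punctuation.
import Mathlib
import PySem

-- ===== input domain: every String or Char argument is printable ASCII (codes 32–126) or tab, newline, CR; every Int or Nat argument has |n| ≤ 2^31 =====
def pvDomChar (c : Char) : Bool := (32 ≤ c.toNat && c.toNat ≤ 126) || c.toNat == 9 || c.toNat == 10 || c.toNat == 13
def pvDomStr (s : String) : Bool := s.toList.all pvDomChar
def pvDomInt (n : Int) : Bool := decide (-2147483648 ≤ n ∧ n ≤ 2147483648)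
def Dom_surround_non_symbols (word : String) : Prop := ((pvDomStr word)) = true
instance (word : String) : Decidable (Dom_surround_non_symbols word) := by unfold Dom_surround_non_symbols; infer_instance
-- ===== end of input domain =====

-- B surrounds punctuation by iterating over string.punctuation and doing whole-string replace(c, ' '+c+' '),
-- instead of A's character-by-character scan with an accumulator; same return value, measured faster in CPython.


-- string.punctuation
def pvPunct : List Char := "!\"#$%&'()*+,-./:;<=>?@[\\]^_`{|}~".toList

-- ===== PORT A =====
def surround_non_symbols (word : String) : String :=
  let list_letters := word.toList
  list_letters.foldl
    (fun new_word symbol =>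
      let sym : String :=
        if PySem.Set.contains (PySem.Set.ofList pvPunct) symbol then
          " " ++ String.ofList [symbol] ++ " "
        else
          String.ofList [symbol]
      new_word ++ sym)
    ""

-- ===== PORT B =====
def surround_non_symbols_alt (word : String) : String :=
  pvPunct.foldl
    (fun result c => PySem.Str.replace result (String.ofList [c]) (String.ofList [' ', c, ' ']))
    word

-- ===== PRECONDITION & SPEC =====
def Spec_surround_non_symbols (word : String) (out : String) : Prop := out = surround_non_symbols_alt word
instance (word : String) (out : String) : Decidable (Spec_surround_non_symbols word out) := by unfold Spec_surround_non_symbols; infer_instance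

-- ===== CLAIM (what is proved, stated in full; the proofs are below) =====
def Claim_equal_surround_non_symbols : Prop := ∀ (word : String), Dom_surround_non_symbols word → Spec_surround_non_symbols word (surround_non_symbols word)

-- ===== LEMMAS AND PROOFS =====

-- the per-character wrapping after the punctuation chars in S have been handled
def pvWrap (S : List Char) (x : Char) : List Char := if x ∈ S then [' ', x, ' '] else [x]

-- single-character replace is a flatMap
theorem go_single (c : Char) (w : List Char) :
    ∀ (l : List Char) (fuel : Nat) (acc : List Char), l.length ≤ fuel →
      PySem.Chars.replace.go [c] w fuel l acc
        = acc.reverse ++ l.flatMap (fun x => if x = c then w else [x]) := by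
  intro l
  induction l with
  | nil =>
    intro fuel acc _
    cases fuel <;> simp [PySem.Chars.replace.go]
  | cons x t ih =>
    intro fuel acc hle
    cases fuel with
    | zero => simp at hle
    | succ n =>
      by_cases hx : x = c
      · subst hx
        have : [x].isPrefixOf (x :: t) = true := by simp [List.isPrefixOf]
        simp only [PySem.Chars.replace.go, this, if_pos]
        rw [show List.drop ([x] : List Char).length (x :: t) = t by simp,
          ih n (w.reverse ++ acc) (by simpa using Nat.le_of_succ_le_succ hle)]
        simp
      · have : [c].isPrefixOf (x :: t) = false := by
          simp [List.isPrefixOf]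
          exact fun h => absurd h.symm hx
        simp only [PySem.Chars.replace.go, this, Bool.false_eq_true, if_neg, not_false_iff]
        rw [ih n (x :: acc) (by simpa using Nat.le_of_succ_le_succ hle)]
        simp [hx]

theorem replace_single (l : List Char) (c : Char) (w : List Char) :
    PySem.Chars.replace l [c] w = l.flatMap (fun x => if x = c then w else [x]) := by
  unfold PySem.Chars.replace
  simpa using go_single c w l l.length [] le_rfl

-- A's fold, on the character level
theorem A_toList (l : List Char) :
    ∀ (acc : String),
      (l.foldl
        (fun new_word symbol =>
          let sym : String :=
            if PySem.Set.contains (PySem.Set.ofList pvPunct) symbol then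
              " " ++ String.ofList [symbol] ++ " "
            else
              String.ofList [symbol]
          new_word ++ sym) acc).toList
      = acc.toList ++ l.flatMap (pvWrap pvPunct) := by
  induction l with
  | nil => intro acc; simp
  | cons x t ih =>
    intro acc
    simp only [List.foldl_cons, ih]
    by_cases hx : x ∈ pvPunct
    · have hc : PySem.Set.contains (PySem.Set.ofList pvPunct) x = true := by
        simp [PySem.Set.contains, PySem.Set.mem_ofList, hx]
      simp [pvWrap, hx]
    · have hc : PySem.Set.contains (PySem.Set.ofList pvPunct) x = false := by
        simp [PySem.Set.contains, PySem.Set.mem_ofList, hx]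
      simp [pvWrap, hx]

-- B's fold over Str.replace, moved to the character level
theorem B_toList (cs : List Char) :
    ∀ (s : String),
      (cs.foldl (fun result c => PySem.Str.replace result (String.ofList [c]) (String.ofList [' ', c, ' '])) s).toList
      = cs.foldl (fun r c => PySem.Chars.replace r [c] [' ', c, ' ']) s.toList := by
  induction cs with
  | nil => intro s; simp
  | cons c t ih =>
    intro s
    simp only [List.foldl_cons, ih, PySem.Str.toList_replace]
    simp

-- the fold over punctuation characters accumulates the wrapping
theorem fold_chars (cs : List Char) :
    ∀ (S : List Char) (l : List Char),
      (∀ c ∈ cs, c ∉ S) → cs.Nodup → ' ' ∉ cs →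
      cs.foldl (fun r c => PySem.Chars.replace r [c] [' ', c, ' ']) (l.flatMap (pvWrap S))
        = l.flatMap (pvWrap (S ++ cs)) := by
  induction cs with
  | nil => intro S l _ _ _; simp
  | cons c t ih =>
    intro S l hd hnd hsp
    have hcS : c ∉ S := hd c (List.mem_cons_self)
    have hcsp : c ≠ ' ' := fun h => hsp (h ▸ List.mem_cons_self)
    have hstep :
        PySem.Chars.replace (l.flatMap (pvWrap S)) [c] [' ', c, ' ']
          = l.flatMap (pvWrap (S ++ [c])) := by
      rw [replace_single, List.flatMap_assoc]
      apply List.flatMap_congr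
      intro x _
      by_cases hx : x ∈ S
      · have hxc : x ≠ c := fun h => hcS (h ▸ hx)
        simp [pvWrap, hx, hxc, Ne.symm hcsp]
      · by_cases hxc : x = c
        · subst hxc; simp [pvWrap, hx]
        · simp [pvWrap, hx, hxc]
    rw [List.foldl_cons, hstep, ih (S ++ [c]) l
      (fun e he => by
        intro hmem
        rcases List.mem_append.mp hmem with h1 | h2
        · exact hd e (List.mem_cons_of_mem _ he) h1
        · have he2 : e = c := by simpa using h2
          exact (List.nodup_cons.mp hnd).1 (he2 ▸ he))
      (List.nodup_cons.mp hnd).2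
      (fun h => hsp (List.mem_cons_of_mem _ h))]
    simp

-- ===== VERDICT (by name: the statement is the Claim_ definition above) =====
theorem surround_non_symbols_spec : Claim_equal_surround_non_symbols := by
  intro word _
  unfold Spec_surround_non_symbols
  have hA : (surround_non_symbols word).toList = word.toList.flatMap (pvWrap pvPunct) := by
    unfold surround_non_symbols
    simpa using A_toList word.toList ""
  have hB : (surround_non_symbols_alt word).toList = word.toList.flatMap (pvWrap pvPunct) := by
    unfold surround_non_symbols_alt
    rw [B_toList]
    have h0 := fold_chars pvPunct [] word.toList (by simp) (by decide) (by decide)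
    have hw : pvWrap [] = fun x => [x] := funext fun x => by simp [pvWrap]
    have hid : List.flatMap (pvWrap []) word.toList = word.toList := by rw [hw]; simp
    rw [hid] at h0
    exact h0
  calc surround_non_symbols word
      = String.ofList (surround_non_symbols word).toList := by simp
    _ = String.ofList (surround_non_symbols_alt word).toList := by rw [hA, hB]
    _ = surround_non_symbols_alt word := by simp
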